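-- pv_equiv track=rewrite | github.com/Kellaubz/AoD23 | Day14.py | count_load
-- ===== SOURCE A (Python) =====
-- def count_load(lines):
--     n=len(lines)
--     s=0
--     for i in range(n):
--         for c in lines[i]:
--             if c=="O":
--                 s+=n-i
--     return s
-- ===== SOURCE B (Python) =====
-- def count_load(lines):
--     seen = 0
--     total = 0
--     for line in lines:
--         seen += line.count("O")
--         total += seen
--     return total
-- ===== Notes on version B (the rewrite author's own statement) =====
-- stated objective: simpler
-- what changed: Replaces the index-based loop with explicit per-row weight n-i (and a char-by-char inner scan) by a single forward pass that keeps a running prefix count of 'O's and adds it to the total each row, so the weights arise by accumulation.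
import Mathlib
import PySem

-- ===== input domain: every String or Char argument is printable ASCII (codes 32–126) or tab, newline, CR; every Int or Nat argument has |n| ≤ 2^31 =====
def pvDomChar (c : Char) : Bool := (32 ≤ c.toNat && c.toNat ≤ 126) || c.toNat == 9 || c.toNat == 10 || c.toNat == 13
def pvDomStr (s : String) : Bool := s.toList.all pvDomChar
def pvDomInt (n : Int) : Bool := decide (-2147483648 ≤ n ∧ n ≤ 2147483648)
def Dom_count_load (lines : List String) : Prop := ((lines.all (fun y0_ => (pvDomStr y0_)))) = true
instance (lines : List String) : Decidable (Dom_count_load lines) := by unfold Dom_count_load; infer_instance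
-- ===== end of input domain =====

-- B replaces the explicit per-row weight n-i (index loop + char scan) by a single forward
-- pass accumulating a running prefix count of 'O's; same cost, simpler decomposition.

-- ===== PORT A =====
def count_load (lines : List String) : Int :=
  let n : Int := (lines.length : Int)
  (PySem.List.pyRange 0 n 1).foldl (fun s i =>
    ((PySem.List.pyGetD lines i "").toList).foldl
      (fun s c => if c = 'O' then s + (n - i) else s) s) 0

-- ===== PORT B =====
def count_load_alt (lines : List String) : Int :=
  let p := lines.foldl (fun (p : Int × Int) line =>
    let seen := p.1 + (PySem.Str.count line "O" : Int)
    (seen, p.2 + seen)) (0, 0)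
  p.2

-- ===== PRECONDITION & SPEC =====
def Spec_count_load (lines : List String) (out : Int) : Prop := out = count_load_alt lines
instance (lines : List String) (out : Int) : Decidable (Spec_count_load lines out) := by unfold Spec_count_load; infer_instance

-- ===== CLAIM (what is proved, stated in full; the proofs are below) =====
def Claim_equal_count_load : Prop := ∀ (lines : List String), Dom_count_load lines → Spec_count_load lines (count_load lines)

-- ===== LEMMAS AND PROOFS =====

-- number of 'O' characters in one line, as an Int
def pvCnt (line : String) : Int := (line.toList.count 'O' : Int)

-- the weighted sum both programs compute: each row's count times the number of rows from it down
def pvWsum : List String → Int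
  | [] => 0
  | l :: t => pvCnt l * ((t.length : Int) + 1) + pvWsum t

theorem go_single (fuel : Nat) : ∀ (cs : List Char) (acc : Nat), cs.length ≤ fuel →
    PySem.Chars.count.go ['O'] fuel cs acc = acc + cs.count 'O' := by
  induction fuel with
  | zero =>
    intro cs acc h
    have : cs = [] := List.eq_nil_of_length_eq_zero (Nat.le_zero.mp h)
    subst this; simp [PySem.Chars.count.go]
  | succ f ih =>
    intro cs acc h
    match cs with
    | [] => simp [PySem.Chars.count.go]
    | c :: t =>
      by_cases hc : c = 'O'
      · simp_all [PySem.Chars.count.go, List.isPrefixOf, ih t]; omega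
      · simp_all [PySem.Chars.count.go, List.isPrefixOf, ih t]
        intro h'; exact absurd h'.symm hc

theorem cnt_eq (s : String) : (PySem.Str.count s "O" : Int) = pvCnt s := by
  unfold pvCnt
  congr 1
  simp [PySem.Str.count_eq]
  show PySem.Chars.count s.toList ['O'] = _
  rw [PySem.Chars.count]
  simp [go_single s.length s.toList 0 (by simp)]

-- the inner character loop of A adds count * k
theorem inner_fold (cs : List Char) (s k : Int) :
    cs.foldl (fun s c => if c = 'O' then s + k else s) s = s + (cs.count 'O' : Int) * k := by
  induction cs generalizing s with
  | nil => simp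
  | cons c t ih =>
    by_cases h : c = 'O' <;> simp [h, ih] <;> ring

-- A's outer loop from index k onwards adds the weighted sum of the remaining suffix
theorem A_general (full : List String) (m : Nat) : ∀ (k : Nat) (s : Int),
    full.length = k + m →
    (PySem.List.pyRange (k : Int) (full.length : Int) 1).foldl (fun s i =>
      ((PySem.List.pyGetD full i "").toList).foldl
        (fun s c => if c = 'O' then s + ((full.length : Int) - i) else s) s) s
    = s + pvWsum (full.drop k) := by
  induction m with
  | zero =>
    intro k s h
    have hnil : List.drop k full = [] := List.drop_eq_nil_of_le (by omega)
    rw [PySem.List.pyRange_one_eq_nil (by omega), hnil]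
    simp [pvWsum]
  | succ m ih =>
    intro k s h
    rw [PySem.List.pyRange_one_cons (by omega)]
    rw [List.foldl_cons]
    have hk : k < full.length := by omega
    have hd : full.drop k = full[k] :: full.drop (k + 1) := by
      rw [List.drop_eq_getElem_cons hk]
    rw [inner_fold]
    have hget : PySem.List.pyGetD full (k : Int) "" = full[k] := by
      simp [PySem.List.pyGetD_natCast, List.getElem?_eq_getElem hk]
    have : ((k : Int) + 1) = ((k + 1 : Nat) : Int) := by push_cast; ring
    rw [this, ih (k + 1) _ (by omega)]
    rw [hd, pvWsum, hget]
    have hlen : ((full.drop (k+1)).length : Int) + 1 = (full.length : Int) - (k : Int) := by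
      simp [List.length_drop]; omega
    rw [hlen]
    unfold pvCnt
    ring

-- B's loop invariant: running (seen, total) from (a, b)
theorem B_general (ls : List String) : ∀ (a b : Int),
    (ls.foldl (fun (p : Int × Int) line =>
      (p.1 + (PySem.Str.count line "O" : Int), p.2 + (p.1 + (PySem.Str.count line "O" : Int)))) (a, b))
    = (a + (ls.map pvCnt).sum, b + a * (ls.length : Int) + pvWsum ls) := by
  induction ls with
  | nil => intro a b; simp [pvWsum]
  | cons l t ih =>
    intro a b
    rw [List.foldl_cons, ih]
    rw [cnt_eq]
    simp only [Prod.mk.injEq, pvWsum]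
    constructor
    · simp [add_assoc]
    · push_cast [List.length_cons]; ring

-- ===== VERDICT (by name: the statement is the Claim_ definition above) =====
theorem count_load_spec : Claim_equal_count_load := by
  intro lines _
  unfold Spec_count_load count_load count_load_alt
  have hA := A_general lines lines.length 0 0 (by omega)
  simp only [Nat.cast_zero] at hA
  rw [hA]
  have hB := B_general lines 0 0
  simp only [hB]
  simp
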